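-- pv_equiv track=rewrite | github.com/KenKarrasch/Adventofcode | 2024/24-12-1.py | find_contiguous_groups
-- ===== SOURCE A (Python) =====
-- def find_contiguous_groups(grid):
--     rows, cols = len(grid), len(grid[0])
--     visited = [[False] * cols for _ in range(rows)]
--     groups = []
--
--     def dfs(r, c, letter):
--         if r < 0 or r >= rows or c < 0 or c >= cols or visited[r][c] or grid[r][c] != letter:
--             return 0, 0
--
--         visited[r][c] = True
--         total = 1
--         borders = 0
--
--         for dr, dc in [(0, 1), (1, 0), (0, -1), (-1, 0)]:
--             nr, nc = r + dr, c + dc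
--             if 0 <= nr < rows and 0 <= nc < cols:
--                 if grid[nr][nc] != letter:
--                     borders += 1
--                 else:
--                     sub_total, sub_borders = dfs(nr, nc, letter)
--                     total += sub_total
--                     borders += sub_borders
--             else:
--                 borders += 1  # Count edge of grid as border
--
--         return total, borders
--
--     for r in range(rows):
--         for c in range(cols):
--             if not visited[r][c]:
--                 total, borders = dfs(r, c, grid[r][c])
--                 groups.append((grid[r][c], total, borders))
--
--     return groups
-- ===== SOURCE B (Python) =====
-- def find_contiguous_groups(grid):
--     rows, cols = len(grid), len(grid[0])
--     visited = [[False] * cols for _ in range(rows)]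
--     groups = []
--     for r in range(rows):
--         for c in range(cols):
--             if visited[r][c]:
--                 continue
--             letter = grid[r][c]
--             area, perim = 0, 0
--             stack = [(r, c)]
--             while stack:
--                 cr, cc = stack.pop()
--                 if visited[cr][cc]:
--                     continue
--                 visited[cr][cc] = True
--                 area += 1
--                 for dr, dc in ((-1, 0), (0, -1), (1, 0), (0, 1)):
--                     nr, nc = cr + dr, cc + dc
--                     if 0 <= nr < rows and 0 <= nc < cols and grid[nr][nc] == letter:
--                         stack.append((nr, nc))
--                     else:
--                         perim += 1
--             groups.append((letter, area, perim))
--     return groups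
-- ===== Notes on version B (the rewrite author's own statement) =====
-- stated objective: alternative
-- what changed: The recursive per-cell dfs is replaced by an explicit LIFO-stack flood fill that pops a cell, skips it if already visited, marks it, counts its area and per-neighbour border contributions, and pushes same-letter neighbours; the outer row-major scan is unchanged.
import Mathlib
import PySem

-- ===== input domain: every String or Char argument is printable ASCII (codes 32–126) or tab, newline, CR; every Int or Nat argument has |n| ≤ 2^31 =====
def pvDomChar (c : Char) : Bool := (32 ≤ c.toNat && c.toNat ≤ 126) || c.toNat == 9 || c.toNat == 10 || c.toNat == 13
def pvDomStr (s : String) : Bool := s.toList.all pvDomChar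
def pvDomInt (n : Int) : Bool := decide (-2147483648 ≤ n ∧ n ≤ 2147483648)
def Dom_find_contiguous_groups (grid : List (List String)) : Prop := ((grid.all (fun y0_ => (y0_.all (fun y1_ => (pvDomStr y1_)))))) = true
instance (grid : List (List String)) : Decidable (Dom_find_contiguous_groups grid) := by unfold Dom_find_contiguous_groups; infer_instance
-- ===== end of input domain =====

-- B replaces A's recursive dfs by an explicit LIFO-stack flood fill (pop, skip if
-- visited, mark, count area and per-cell border contributions, push same-letter
-- neighbours); same outer row-major scan, equal return value (objective: alternative).

-- ===== shared grid/visited helpers (used literally by both ports) =====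
def pvRowsN (grid : List (List String)) : Nat := grid.length
def pvColsN (grid : List (List String)) : Nat := (grid.headD []).length
-- 0 <= r < rows and 0 <= c < cols
def pvInb (grid : List (List String)) (r c : Int) : Bool :=
  decide (0 ≤ r) && decide (r < (pvRowsN grid : Int)) && decide (0 ≤ c) && decide (c < (pvColsN grid : Int))
-- grid[r][c]; exact under pvInb and Pre_ (every row has at least cols entries)
def pvCell (grid : List (List String)) (r c : Int) : String := (grid.getD r.toNat []).getD c.toNat ""
-- visited[r][c]; exact whenever (r,c) is in range of the visited matrix
def pvVisGet (v : List (List Bool)) (r c : Int) : Bool := (v.getD r.toNat []).getD c.toNat false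
-- in range of the visited matrix and not yet visited (totality guard for B's loop;
-- on reachable states the range part always holds)
def pvVisOk (v : List (List Bool)) (r c : Int) : Bool :=
  decide (0 ≤ r) && decide (r.toNat < v.length) && decide (0 ≤ c) &&
    decide (c.toNat < (v.getD r.toNat []).length) && !pvVisGet v r c
-- visited[r][c] = True
def pvMark (v : List (List Bool)) (r c : Int) : List (List Bool) :=
  v.modify r.toNat (fun row => row.set c.toNat true)
-- number of still-unvisited entries (termination measure only)
def pvUcount (v : List (List Bool)) : Nat := (v.map (fun row => row.count false)).sum
-- [[False] * cols for _ in range(rows)]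
def pvInit (grid : List (List String)) : List (List Bool) :=
  List.replicate (pvRowsN grid) (List.replicate (pvColsN grid) false)
-- A's neighbour order [(0,1),(1,0),(0,-1),(-1,0)]
def pvDirsA : List (Int × Int) := [(0,1),(1,0),(0,-1),(-1,0)]
-- B's push order (the reverse, so that pops come in A's order)
def pvDirsB : List (Int × Int) := [(-1,0),(0,-1),(1,0),(0,1)]
-- the row-major outer scan: (r, c) for r in range(rows) for c in range(cols)
def pvCellsScan (grid : List (List String)) : List (Int × Int) :=
  (List.range (pvRowsN grid)).flatMap (fun (r : Nat) => (List.range (pvColsN grid)).map (fun (c : Nat) => ((r : Int), (c : Int))))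

-- ===== lemmas cited by the ports' termination arguments =====
theorem pv_count_set_true_lt (row : List Bool) (c : Nat) (hc : c < row.length)
    (hf : row.getD c false = false) : (row.set c true).count false < row.count false := by
  induction row generalizing c with
  | nil => simp at hc
  | cons a l ih =>
    cases c with
    | zero => simp at hf; subst hf; simp
    | succ n =>
      simp at hc hf
      cases a <;> simp
      · exact ih n hc hf
      · exact ih n hc hf

theorem pvU_modify_lt (v : List (List Bool)) (i c : Nat) (hi : i < v.length)
    (hc : c < (v.getD i []).length) (hf : (v.getD i []).getD c false = false) :
    pvUcount (v.modify i (fun row => row.set c true)) < pvUcount v := by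
  induction v generalizing i with
  | nil => simp at hi
  | cons a l ih =>
    cases i with
    | zero =>
      simp [List.getD] at hc hf
      have := pv_count_set_true_lt a c hc (by simpa [List.getD] using hf)
      simp [pvUcount]; omega
    | succ n =>
      simp [List.getD] at hi hc hf
      have := ih n hi (by simpa [List.getD] using hc) (by simpa [List.getD] using hf)
      simp [pvUcount] at this ⊢; omega

theorem pvMark_lt (v : List (List Bool)) (r c : Int) (h : pvVisOk v r c = true) :
    pvUcount (pvMark v r c) < pvUcount v := by
  simp only [pvVisOk, Bool.and_eq_true, decide_eq_true_eq, Bool.not_eq_true'] at h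
  obtain ⟨⟨⟨⟨h1, h2⟩, h3⟩, h4⟩, h5⟩ := h
  exact pvU_modify_lt v r.toNat c.toNat h2 h4 (by simpa [pvVisGet] using h5)

-- ===== PORT A =====
-- recursive dfs, fuel-guarded for totality (fuel never runs out on the calls the
-- outer loop makes; a fuel-0 call returns exactly what a guarded Python call returns)
def pvDfs (grid : List (List String)) : Nat → List (List Bool) → Int → Int → String → List (List Bool) × Int × Int
  | 0, v, _, _, _ => (v, 0, 0)
  | fuel+1, v, r, c, letter =>
    if !pvInb grid r c || pvVisGet v r c || pvCell grid r c != letter then (v, 0, 0)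
    else
      pvDirsA.foldl (fun st d =>
        let nr := r + d.1
        let nc := c + d.2
        if pvInb grid nr nc then
          if pvCell grid nr nc != letter then (st.1, st.2.1, st.2.2 + 1)
          else
            let res := pvDfs grid fuel st.1 nr nc letter
            (res.1, st.2.1 + res.2.1, st.2.2 + res.2.2)
        else (st.1, st.2.1, st.2.2 + 1))
        (pvMark v r c, 1, 0)

def pvOuterA (grid : List (List String)) :
    List (Int × Int) → List (List Bool) → List (String × Int × Int) → List (String × Int × Int)
  | [], _, acc => acc
  | (r, c) :: cs, v, acc =>
    if pvVisGet v r c then pvOuterA grid cs v acc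
    else
      let letter := pvCell grid r c
      let res := pvDfs grid (pvUcount v + 1) v r c letter
      pvOuterA grid cs res.1 (acc ++ [(letter, res.2.1, res.2.2)])

def find_contiguous_groups (grid : List (List String)) : List (String × Int × Int) :=
  pvOuterA grid (pvCellsScan grid) (pvInit grid) []

-- ===== PORT B =====
-- the while-stack loop of Source B; pvVisOk's range part is a totality guard only
def pvFlood (grid : List (List String)) (letter : String) :
    List (List Bool) → List (Int × Int) → Int → Int → List (List Bool) × Int × Int
  | v, [], area, perim => (v, area, perim)
  | v, (cr, cc) :: rest, area, perim =>
    if h : pvVisOk v cr cc then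
      let v1 := pvMark v cr cc
      let sp := pvDirsB.foldl (fun (acc : List (Int × Int) × Int) d =>
          let nr := cr + d.1
          let nc := cc + d.2
          if pvInb grid nr nc && (pvCell grid nr nc == letter) then ((nr, nc) :: acc.1, acc.2)
          else (acc.1, acc.2 + 1))
        (rest, perim)
      pvFlood grid letter v1 sp.1 (area + 1) sp.2
    else pvFlood grid letter v rest area perim
  termination_by v stack _ _ => (pvUcount v, stack.length)
  decreasing_by
  · exact Prod.Lex.left _ _ (pvMark_lt _ _ _ h)
  · exact Prod.Lex.right _ (Nat.lt_succ_self _)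

def pvOuterB (grid : List (List String)) :
    List (Int × Int) → List (List Bool) → List (String × Int × Int) → List (String × Int × Int)
  | [], _, acc => acc
  | (r, c) :: cs, v, acc =>
    if pvVisGet v r c then pvOuterB grid cs v acc
    else
      let letter := pvCell grid r c
      let res := pvFlood grid letter v [(r, c)] 0 0
      pvOuterB grid cs res.1 (acc ++ [(letter, res.2.1, res.2.2)])

def find_contiguous_groups_alt (grid : List (List String)) : List (String × Int × Int) :=
  pvOuterB grid (pvCellsScan grid) (pvInit grid) []

-- ===== PRECONDITION & SPEC =====
-- Pre_ excludes exactly the inputs on which Python A raises: the empty grid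
-- (IndexError on grid[0]) and ragged grids with a row shorter than row 0
-- (IndexError on grid[r][c] for some scanned cell).
def Pre_find_contiguous_groups (grid : List (List String)) : Prop :=
  grid ≠ [] ∧ ∀ row ∈ grid, pvColsN grid ≤ row.length
instance (grid : List (List String)) : Decidable (Pre_find_contiguous_groups grid) := by
  unfold Pre_find_contiguous_groups; infer_instance

def pvWitness_find_contiguous_groups : List (List String) := [["A", "A"], ["A", "B"]]

def Spec_find_contiguous_groups (grid : List (List String)) (out : List (String × Int × Int)) : Prop :=
  out = find_contiguous_groups_alt grid
instance (grid : List (List String)) (out : List (String × Int × Int)) :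
    Decidable (Spec_find_contiguous_groups grid out) := by
  unfold Spec_find_contiguous_groups; infer_instance

-- ===== CLAIM (what is proved, stated in full; the proofs are below) =====
def Claim_equal_find_contiguous_groups : Prop :=
  ∀ (grid : List (List String)), Dom_find_contiguous_groups grid →
    Pre_find_contiguous_groups grid →
    Spec_find_contiguous_groups grid (find_contiguous_groups grid)

-- ===== LEMMAS AND PROOFS =====

theorem pv_count_set_true_le (row : List Bool) (c : Nat) :
    (row.set c true).count false ≤ row.count false := by
  induction row generalizing c with
  | nil => simp
  | cons a l ih =>
    cases c with
    | zero => cases a <;> simp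
    | succ n => cases a <;> simp <;> exact ih n

theorem pvU_modify_le (v : List (List Bool)) (i c : Nat) :
    pvUcount (v.modify i (fun row => row.set c true)) ≤ pvUcount v := by
  induction v generalizing i with
  | nil => simp [List.modify_nil]
  | cons a l ih =>
    cases i with
    | zero =>
      have := pv_count_set_true_le a c
      simp [pvUcount]; omega
    | succ n =>
      have := ih n
      simp [pvUcount] at this ⊢; omega

theorem pvUcount_mark_le (v : List (List Bool)) (r c : Int) :
    pvUcount (pvMark v r c) ≤ pvUcount v := pvU_modify_le v r.toNat c.toNat

-- a neighbour cell is "good" when it is in bounds and carries the group's letter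
def pvGood (grid : List (List String)) (letter : String) (p : Int × Int) : Bool :=
  pvInb grid p.1 p.2 && (pvCell grid p.1 p.2 == letter)

def pvNbrs (r c : Int) : List (Int × Int) := pvDirsA.map (fun d => (r + d.1, c + d.2))

def pvBadC (grid : List (List String)) (letter : String) (ps : List (Int × Int)) : Int :=
  ((ps.filter (fun q => !pvGood grid letter q)).length : Int)

def pvShape (grid : List (List String)) (v : List (List Bool)) : Prop :=
  v.length = pvRowsN grid ∧ ∀ i, i < v.length → (v.getD i []).length = pvColsN grid

def pvStepA (grid : List (List String)) (letter : String) (fuel : Nat)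
    (st : List (List Bool) × Int × Int) (p : Int × Int) : List (List Bool) × Int × Int :=
  if pvInb grid p.1 p.2 then
    if pvCell grid p.1 p.2 != letter then (st.1, st.2.1, st.2.2 + 1)
    else
      let res := pvDfs grid fuel st.1 p.1 p.2 letter
      (res.1, st.2.1 + res.2.1, st.2.2 + res.2.2)
  else (st.1, st.2.1, st.2.2 + 1)

theorem pvDfs_succ (grid : List (List String)) (fuel : Nat) (v : List (List Bool))
    (r c : Int) (letter : String) :
    pvDfs grid (fuel+1) v r c letter =
      if !pvInb grid r c || pvVisGet v r c || pvCell grid r c != letter then (v, 0, 0)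
      else (pvNbrs r c).foldl (pvStepA grid letter fuel) (pvMark v r c, 1, 0) := by
  rw [pvNbrs, List.foldl_map]
  simp only [pvDfs, pvStepA]

theorem pvShape_mark (grid : List (List String)) (v : List (List Bool)) (r c : Int)
    (h : pvShape grid v) : pvShape grid (pvMark v r c) := by
  obtain ⟨h1, h2⟩ := h
  refine ⟨by simpa [pvMark] using h1, fun i hi => ?_⟩
  simp only [pvMark, List.length_modify] at hi
  have := h2 i hi
  simp only [pvMark, List.getD_eq_getElem?_getD, List.getElem?_modify] at *
  rcases hx : v[i]? with _ | row
  · simp [hx] at this ⊢; exact this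
  · simp [hx] at this ⊢
    split <;> simp [this]

theorem pvDfs_inv (grid : List (List String)) (letter : String) : ∀ (fuel : Nat)
    (v : List (List Bool)) (r c : Int), pvShape grid v →
    pvShape grid (pvDfs grid fuel v r c letter).1 ∧
      pvUcount (pvDfs grid fuel v r c letter).1 ≤ pvUcount v := by
  intro fuel
  induction fuel with
  | zero => intro v r c h; exact ⟨h, le_rfl⟩
  | succ fuel ih =>
    intro v r c h
    rw [pvDfs_succ]
    split
    · exact ⟨h, le_rfl⟩
    · have key : ∀ (ps : List (Int × Int)) (st : List (List Bool) × Int × Int),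
          pvShape grid st.1 →
          pvShape grid ((ps.foldl (pvStepA grid letter fuel) st).1) ∧
            pvUcount ((ps.foldl (pvStepA grid letter fuel) st).1) ≤ pvUcount st.1 := by
        intro ps
        induction ps with
        | nil => intro st hst; exact ⟨hst, le_rfl⟩
        | cons p ps ihp =>
          intro st hst
          simp only [List.foldl_cons]
          have hstep : pvShape grid ((pvStepA grid letter fuel st p).1) ∧
              pvUcount ((pvStepA grid letter fuel st p).1) ≤ pvUcount st.1 := by
            unfold pvStepA
            split
            · split
              · exact ⟨hst, le_rfl⟩
              · exact ih st.1 p.1 p.2 hst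
            · exact ⟨hst, le_rfl⟩
          obtain ⟨hs1, hu1⟩ := hstep
          obtain ⟨hs2, hu2⟩ := ihp _ hs1
          exact ⟨hs2, le_trans hu2 hu1⟩
      obtain ⟨hs, hu⟩ := key (pvNbrs r c) (pvMark v r c, 1, 0) (pvShape_mark grid v r c h)
      exact ⟨hs, le_trans hu (pvUcount_mark_le v r c)⟩

theorem pvVisOk_iff (grid : List (List String)) (v : List (List Bool)) (r c : Int)
    (hs : pvShape grid v) (hin : pvInb grid r c = true) :
    pvVisOk v r c = !pvVisGet v r c := by
  obtain ⟨h1, h2⟩ := hs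
  simp only [pvInb, Bool.and_eq_true, decide_eq_true_eq] at hin
  obtain ⟨⟨⟨g1, g2⟩, g3⟩, g4⟩ := hin
  have hr : r.toNat < v.length := by omega
  have hc : c.toNat < v[r.toNat].length := by
    have h3 := h2 r.toNat hr
    rw [List.getD_eq_getElem?_getD, List.getElem?_eq_getElem hr] at h3
    simp at h3; omega
  simp [pvVisOk, List.getD_eq_getElem?_getD, g1, g3, hr, hc]

theorem pvPushFold (grid : List (List String)) (letter : String) (cr cc : Int)
    (rest : List (Int × Int)) (p : Int) :
    pvDirsB.foldl (fun (acc : List (Int × Int) × Int) d =>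
        let nr := cr + d.1
        let nc := cc + d.2
        if pvInb grid nr nc && (pvCell grid nr nc == letter) then ((nr, nc) :: acc.1, acc.2)
        else (acc.1, acc.2 + 1))
      (rest, p) =
      ((pvNbrs cr cc).filter (pvGood grid letter) ++ rest, p + pvBadC grid letter (pvNbrs cr cc)) := by
  simp only [pvDirsB, pvNbrs, pvDirsA, pvBadC, pvGood, List.foldl_cons, List.foldl_nil,
    List.map_cons, List.map_nil, List.filter_cons, List.filter_nil]
  by_cases h1 : (pvInb grid (cr + 0) (cc + 1) && (pvCell grid (cr + 0) (cc + 1) == letter)) = true <;>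
  by_cases h2 : (pvInb grid (cr + 1) (cc + 0) && (pvCell grid (cr + 1) (cc + 0) == letter)) = true <;>
  by_cases h3 : (pvInb grid (cr + 0) (cc + -1) && (pvCell grid (cr + 0) (cc + -1) == letter)) = true <;>
  by_cases h4 : (pvInb grid (cr + -1) (cc + 0) && (pvCell grid (cr + -1) (cc + 0) == letter)) = true <;>
  simp only [Bool.and_eq_true, beq_iff_eq, add_zero] at h1 h2 h3 h4 <;>
  simp [h1, h2, h3, h4] <;> (split_ifs <;> simp_all <;> try omega)

theorem pvSim (grid : List (List String)) (letter : String) : ∀ (fuel : Nat)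
    (v : List (List Bool)) (r c : Int) (stack : List (Int × Int)) (t b : Int),
    pvShape grid v → pvUcount v < fuel → pvInb grid r c = true → pvCell grid r c = letter →
    pvFlood grid letter v ((r, c) :: stack) t b =
      pvFlood grid letter (pvDfs grid fuel v r c letter).1 stack
        (t + (pvDfs grid fuel v r c letter).2.1) (b + (pvDfs grid fuel v r c letter).2.2) := by
  intro fuel
  induction fuel with
  | zero => intro v r c stack t b _ hu; exact absurd hu (Nat.not_lt_zero _)
  | succ fuel ih =>
    intro v r c stack t b hs hu hin hcell
    by_cases hvis : pvVisGet v r c = true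
    · have hok : pvVisOk v r c = false := by
        rw [pvVisOk_iff grid v r c hs hin, hvis]; rfl
      rw [pvDfs_succ, if_pos (by simp [hvis])]
      simp [pvFlood, hok]
    · have hvis' : pvVisGet v r c = false := by simpa using hvis
      have hok : pvVisOk v r c = true := by
        rw [pvVisOk_iff grid v r c hs hin, hvis']; rfl
      have humark : pvUcount (pvMark v r c) < fuel :=
        Nat.lt_of_lt_of_le (pvMark_lt v r c hok) (Nat.lt_succ_iff.mp hu)
      have hsmark : pvShape grid (pvMark v r c) := pvShape_mark grid v r c hs
      have inner : ∀ (ps : List (Int × Int)) (v' : List (List Bool)) (t0 b0 : Int),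
          pvShape grid v' → pvUcount v' < fuel →
          pvFlood grid letter v' (ps.filter (pvGood grid letter) ++ stack)
              (t + t0) (b + b0 + pvBadC grid letter ps) =
            pvFlood grid letter ((ps.foldl (pvStepA grid letter fuel) (v', t0, b0)).1) stack
              (t + (ps.foldl (pvStepA grid letter fuel) (v', t0, b0)).2.1)
              (b + (ps.foldl (pvStepA grid letter fuel) (v', t0, b0)).2.2) := by
        intro ps
        induction ps with
        | nil => intro v' t0 b0 _ _; simp [pvBadC]
        | cons p ps ihp =>
          intro v' t0 b0 hs' hu'
          obtain ⟨p1, p2⟩ := p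
          by_cases hg : pvGood grid letter (p1, p2) = true
          · have hg2 : pvInb grid p1 p2 = true ∧ (pvCell grid p1 p2 == letter) = true := by
              simpa [pvGood, Bool.and_eq_true] using hg
            obtain ⟨hinp, hceq⟩ := hg2
            have hcellp : pvCell grid p1 p2 = letter := by simpa using hceq
            have hbad : pvBadC grid letter ((p1, p2) :: ps) = pvBadC grid letter ps := by
              simp [pvBadC, hg]
            rw [hbad, List.filter_cons_of_pos hg]
            rw [List.cons_append]
            rw [ih v' p1 p2 (ps.filter (pvGood grid letter) ++ stack)
              (t + t0) (b + b0 + pvBadC grid letter ps) hs' hu' hinp hcellp]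
            have harg1 : t + t0 + (pvDfs grid fuel v' p1 p2 letter).2.1 =
                t + (t0 + (pvDfs grid fuel v' p1 p2 letter).2.1) := by ring
            have harg2 : b + b0 + pvBadC grid letter ps + (pvDfs grid fuel v' p1 p2 letter).2.2 =
                b + (b0 + (pvDfs grid fuel v' p1 p2 letter).2.2) + pvBadC grid letter ps := by ring
            rw [harg1, harg2]
            obtain ⟨hsR, huR⟩ := pvDfs_inv grid letter fuel v' p1 p2 hs'
            rw [ihp (pvDfs grid fuel v' p1 p2 letter).1
              (t0 + (pvDfs grid fuel v' p1 p2 letter).2.1)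
              (b0 + (pvDfs grid fuel v' p1 p2 letter).2.2) hsR (Nat.lt_of_le_of_lt huR hu')]
            have hstep : pvStepA grid letter fuel (v', t0, b0) (p1, p2) =
                ((pvDfs grid fuel v' p1 p2 letter).1,
                  t0 + (pvDfs grid fuel v' p1 p2 letter).2.1,
                  b0 + (pvDfs grid fuel v' p1 p2 letter).2.2) := by
              simp [pvStepA, hinp, hcellp]
            rw [List.foldl_cons, hstep]
          · have hg' : pvGood grid letter (p1, p2) = false := by simpa using hg
            have hbad : pvBadC grid letter ((p1, p2) :: ps) = pvBadC grid letter ps + 1 := by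
              simp [pvBadC, hg']
            rw [hbad, List.filter_cons_of_neg (by simp [hg'])]
            have harg : b + b0 + (pvBadC grid letter ps + 1) =
                b + (b0 + 1) + pvBadC grid letter ps := by ring
            rw [harg, ihp v' t0 (b0 + 1) hs' hu']
            have hstep : pvStepA grid letter fuel (v', t0, b0) (p1, p2) = (v', t0, b0 + 1) := by
              simp only [pvGood, Bool.and_eq_true] at hg
              unfold pvStepA
              by_cases hi : pvInb grid p1 p2 = true
              · have hcf : (pvCell grid p1 p2 == letter) = false := by
                  rcases Bool.eq_false_or_eq_true (pvCell grid p1 p2 == letter) with ht | hf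
                  · exact absurd ⟨hi, ht⟩ hg
                  · exact hf
                simp [hi, bne, hcf]
              · simp [Bool.eq_false_iff.mpr hi]
            rw [List.foldl_cons, hstep]
      rw [pvDfs_succ, if_neg (by simp [hin, hvis', hcell])]
      have hfl : pvFlood grid letter v ((r, c) :: stack) t b =
          pvFlood grid letter (pvMark v r c)
            (((pvNbrs r c).filter (pvGood grid letter)) ++ stack) (t + 1)
            (b + 0 + pvBadC grid letter (pvNbrs r c)) := by
        conv_lhs => rw [pvFlood]
        rw [dif_pos hok]
        rw [pvPushFold grid letter r c stack b]
        norm_num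
      rw [hfl, inner (pvNbrs r c) (pvMark v r c) 1 0 hsmark humark]

theorem pvOuter_eq (grid : List (List String)) : ∀ (cs : List (Int × Int))
    (v : List (List Bool)) (acc : List (String × Int × Int)),
    pvShape grid v → (∀ p ∈ cs, pvInb grid p.1 p.2 = true) →
    pvOuterA grid cs v acc = pvOuterB grid cs v acc := by
  intro cs
  induction cs with
  | nil => intro v acc _ _; rfl
  | cons p cs ih =>
    intro v acc hs hcs
    obtain ⟨r, c⟩ := p
    have hin : pvInb grid r c = true := hcs (r, c) (List.mem_cons_self ..)
    have hcs' : ∀ p ∈ cs, pvInb grid p.1 p.2 = true := fun p hp => hcs p (List.mem_cons_of_mem _ hp)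
    by_cases hv : pvVisGet v r c = true
    · simp only [pvOuterA, pvOuterB, hv, if_true]
      exact ih v acc hs hcs'
    · simp only [pvOuterA, pvOuterB, hv, if_false, Bool.false_eq_true]
      have hsim := pvSim grid (pvCell grid r c) (pvUcount v + 1) v r c [] 0 0 hs
        (Nat.lt_succ_self _) hin rfl
      have hfl : pvFlood grid (pvCell grid r c)
          (pvDfs grid (pvUcount v + 1) v r c (pvCell grid r c)).1 []
          (0 + (pvDfs grid (pvUcount v + 1) v r c (pvCell grid r c)).2.1)
          (0 + (pvDfs grid (pvUcount v + 1) v r c (pvCell grid r c)).2.2) =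
          ((pvDfs grid (pvUcount v + 1) v r c (pvCell grid r c)).1,
            (pvDfs grid (pvUcount v + 1) v r c (pvCell grid r c)).2.1,
            (pvDfs grid (pvUcount v + 1) v r c (pvCell grid r c)).2.2) := by
        rw [pvFlood]; norm_num
      obtain ⟨hsR, _⟩ := pvDfs_inv grid (pvCell grid r c) (pvUcount v + 1) v r c hs
      rw [hsim, hfl]
      dsimp only
      exact ih _ _ hsR hcs'

theorem pvCellsScan_inb (grid : List (List String)) :
    ∀ p ∈ pvCellsScan grid, pvInb grid p.1 p.2 = true := by
  intro p hp
  unfold pvCellsScan at hp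
  obtain ⟨r0, hr0, hp2⟩ := List.mem_flatMap.mp hp
  obtain ⟨c0, hc0, rfl⟩ := List.mem_map.mp hp2
  rw [List.mem_range] at hr0 hc0
  simp only [pvInb, Bool.and_eq_true, decide_eq_true_eq]
  omega

theorem pvShape_init (grid : List (List String)) : pvShape grid (pvInit grid) := by
  refine ⟨by simp [pvInit], fun i hi => ?_⟩
  simp [pvInit] at hi ⊢
  simp [hi]

-- ===== VERDICT (by name: the statement is the Claim_ definition above) =====
theorem find_contiguous_groups_spec : Claim_equal_find_contiguous_groups := by
  intro grid _ _
  unfold Spec_find_contiguous_groups find_contiguous_groups find_contiguous_groups_alt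
  exact pvOuter_eq grid (pvCellsScan grid) (pvInit grid) [] (pvShape_init grid) (pvCellsScan_inb grid)
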